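-- pv_equiv track=rewrite | github.com/coco-in-bluemoon/baekjoon-online-judge | CLASS 2/2775: 부녀회장이 될테야/solution.py | solution
-- ===== SOURCE A (Python) =====
-- def solution(floor, no):
--     BASE = 0
--     number_of_people = [[0] * (no+1) for _ in range(floor+1)]
--
--     for f in range(floor+1):
--         for n in range(1, no+1):
--
--             if f == BASE:
--                 number_of_people[f][n] = n
--             else:
--                 number_of_people[f][n] = sum(number_of_people[f-1][:n+1])
--
--     return number_of_people[floor][no]
-- ===== SOURCE B (Python) =====
-- def solution(floor, no):
--     row = list(range(no + 1))
--     for _ in range(floor):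
--         acc = 0
--         new = []
--         for v in row:
--             acc += v
--             new.append(acc)
--         row = new
--     return row[no]
-- ===== Notes on version B (the rewrite author's own statement) =====
-- stated objective: faster
-- what changed: replaces the (floor+1)x(no+1) table whose every cell re-sums a slice of the previous row with a single row updated floor times by a running prefix sum
import Mathlib
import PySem

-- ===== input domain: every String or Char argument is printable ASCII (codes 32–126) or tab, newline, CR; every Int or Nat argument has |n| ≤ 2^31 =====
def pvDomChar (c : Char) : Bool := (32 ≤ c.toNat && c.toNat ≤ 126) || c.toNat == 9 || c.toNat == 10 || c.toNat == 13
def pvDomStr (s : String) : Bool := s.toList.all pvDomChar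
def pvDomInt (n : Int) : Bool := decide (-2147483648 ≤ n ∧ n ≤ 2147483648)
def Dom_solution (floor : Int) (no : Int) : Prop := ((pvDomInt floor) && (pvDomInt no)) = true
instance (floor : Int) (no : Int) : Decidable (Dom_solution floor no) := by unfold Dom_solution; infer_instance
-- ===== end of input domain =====

-- B replaces A's per-cell re-summing of a slice of the previous row with one running prefix-sum pass per floor (return value only).

-- ===== PORT A =====
-- Python's list-of-lists is an array of rows; the table is an Array to get Python's O(1) row
-- get/set. The hand-ported Array accesses are exact here because the loop indices f and f-1
-- always lie in [0, floor+1) (f is drawn from range(floor+1)).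
-- body of A's inner `for n in range(1, no+1)` loop (one update of number_of_people[f][n])
def aInner (f : Int) (tb : Array (List Int)) (n : Int) : Array (List Int) :=
  tb.setIfInBounds f.toNat
    (PySem.List.pySetD (tb[f.toNat]?.getD []) n
      (if f == 0 then n
       else (PySem.List.slice (tb[(f-1).toNat]?.getD []) none (some (n+1))).sum))

-- body of A's outer `for f in range(floor+1)` loop
def aOuter (no : Int) (tb : Array (List Int)) (f : Int) : Array (List Int) :=
  (PySem.List.pyRange 1 (no+1) 1).foldl (aInner f) tb

def solution (floor : Int) (no : Int) : Int :=
  PySem.List.pyGetD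
    (PySem.List.pyGetD
      (((PySem.List.pyRange 0 (floor+1) 1).foldl (aOuter no)
        ((PySem.List.pyRange 0 (floor+1) 1).map (fun _ => PySem.List.pyRepeat [(0:Int)] (no+1))).toArray).toList)
      floor [])
    no 0

-- ===== PORT B =====
-- body of B's `for _ in range(floor)` loop: one running prefix-sum pass over row;
-- `new.append(acc)` is encoded by consing onto the front with a single final reverse
-- (Python's O(1) append), producing the same list
def bScan (row : List Int) : List Int :=
  ((row.foldl (fun (p : Int × List Int) v => (p.1 + v, (p.1 + v) :: p.2)) ((0:Int), ([] : List Int))).2).reverse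

def solution_alt (floor : Int) (no : Int) : Int :=
  PySem.List.pyGetD
    ((PySem.List.pyRange 0 floor 1).foldl (fun row _ => bScan row)
      (PySem.List.pyRange 0 (no+1) 1))
    no 0

-- ===== PRECONDITION & SPEC =====
-- A raises IndexError whenever floor < 0 or no < 0 (the table lookups at the end); those inputs are excluded.
def Pre_solution (floor : Int) (no : Int) : Prop := 0 ≤ floor ∧ 0 ≤ no
instance (floor : Int) (no : Int) : Decidable (Pre_solution floor no) := by unfold Pre_solution; infer_instance
def pvWitness_solution : Int × Int := (2, 3)

def Spec_solution (floor : Int) (no : Int) (out : Int) : Prop := out = solution_alt floor no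
instance (floor : Int) (no : Int) (out : Int) : Decidable (Spec_solution floor no out) := by unfold Spec_solution; infer_instance

-- ===== CLAIM (what is proved, stated in full; the proofs are below) =====
def Claim_equal_solution : Prop := ∀ (floor : Int) (no : Int), Dom_solution floor no → Pre_solution floor no → Spec_solution floor no (solution floor no)

-- ===== LEMMAS AND PROOFS =====

-- running prefix sums of a list, starting from accumulator a
def psum : Int → List Int → List Int
  | _, [] => []
  | a, v :: t => (a + v) :: psum (a + v) t

-- mathematical row f of the building
def Rrow (no : Int) : Nat → List Int
  | 0 => PySem.List.pyRange 0 (no+1) 1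
  | k+1 => psum 0 (Rrow no k)

def zeroRow (no : Int) : List Int := List.replicate (no+1).toNat 0

-- ---- generic list-index helpers (proved here to be self-contained) ----

theorem mapE {α β : Type} (f : α → β) : ∀ (l : List α) (i : Nat), (l.map f)[i]? = (l[i]?).map f := by
  intro l
  induction l with
  | nil => intro i; simp
  | cons x t ih =>
    intro i
    cases i with
    | zero => simp
    | succ j => simp [ih]

theorem appL {α : Type} : ∀ (l1 l2 : List α) (i : Nat), i < l1.length → (l1 ++ l2)[i]? = l1[i]? := by
  intro l1
  induction l1 with
  | nil => intro l2 i h; simp at h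
  | cons x t ih =>
    intro l2 i h
    cases i with
    | zero => simp
    | succ j =>
      rw [List.cons_append, List.getElem?_cons_succ, List.getElem?_cons_succ]
      exact ih l2 j (by simp at h; omega)

theorem appR {α : Type} : ∀ (l1 l2 : List α) (i : Nat), l1.length ≤ i → (l1 ++ l2)[i]? = l2[i - l1.length]? := by
  intro l1
  induction l1 with
  | nil => intro l2 i h; simp
  | cons x t ih =>
    intro l2 i h
    cases i with
    | zero => simp at h
    | succ j =>
      rw [List.cons_append, List.getElem?_cons_succ, ih l2 j (by simp at h; omega)]
      congr 1
      simp [List.length_cons]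

theorem rangeE : ∀ (n i : Nat), (List.range n)[i]? = if i < n then some i else none := by
  intro n
  induction n with
  | zero => intro i; simp
  | succ m ih =>
    intro i
    rw [List.range_succ]
    by_cases h : i < m
    · rw [appL _ _ i (by simp [List.length_range]; omega), ih i, if_pos h, if_pos (by omega)]
    · by_cases h2 : i = m
      · subst h2
        rw [appR _ _ i (by simp)]
        simp
      · rw [appR _ _ i (by simp [List.length_range]; omega), if_neg (by omega), List.length_range]
        have hd : i - m = (i - m - 1) + 1 := by omega
        rw [hd, List.getElem?_cons_succ]
        simp

theorem repE {α : Type} (a : α) : ∀ (n i : Nat), (List.replicate n a)[i]? = if i < n then some a else none := by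
  intro n
  induction n with
  | zero => intro i; simp
  | succ m ih =>
    intro i
    cases i with
    | zero => simp [List.replicate_succ]
    | succ j =>
      rw [List.replicate_succ, List.getElem?_cons_succ, ih j]
      by_cases h : j < m
      · rw [if_pos h, if_pos (by omega)]
      · rw [if_neg h, if_neg (by omega)]

theorem setE {α : Type} (a : α) : ∀ (l : List α) (i j : Nat),
    (l.set i a)[j]? = if (j = i ∧ j < l.length) then some a else l[j]? := by
  intro l
  induction l with
  | nil => intro i j; simp
  | cons x t ih =>
    intro i j
    cases i with
    | zero =>
      have hset : ((x :: t).set 0 a) = a :: t := rfl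
      cases j with
      | zero =>
        rw [hset, List.getElem?_cons_zero, if_pos ⟨rfl, by simp⟩]
      | succ j' =>
        rw [hset, List.getElem?_cons_succ, List.getElem?_cons_succ, if_neg (by omega)]
    | succ i' =>
      have hset : ((x :: t).set (i'+1) a) = x :: t.set i' a := rfl
      cases j with
      | zero =>
        rw [hset, List.getElem?_cons_zero, if_neg (by omega), List.getElem?_cons_zero]
      | succ j' =>
        rw [hset, List.getElem?_cons_succ, List.getElem?_cons_succ, ih i' j']
        by_cases h : j' = i' ∧ j' < t.length
        · rw [if_pos h, if_pos (by simp [List.length_cons]; omega)]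
        · rw [if_neg h, if_neg (by simp [List.length_cons]; omega)]

theorem getD_q {α : Type} : ∀ (l : List α) (n : Nat) (d : α), l.getD n d = (l[n]?).getD d := by
  intro l
  induction l with
  | nil => intro n d; cases n <;> rfl
  | cons x t ih =>
    intro n d
    cases n with
    | zero => rfl
    | succ m =>
      rw [List.getElem?_cons_succ]
      exact ih m d

theorem getD_set_self {α : Type} (l : List α) (i : Nat) (a d : α) (h : i < l.length) :
    (l.set i a).getD i d = a := by
  rw [getD_q, setE, if_pos ⟨rfl, h⟩]
  rfl

theorem getD_set_ne {α : Type} (l : List α) (i j : Nat) (a d : α) (hij : j ≠ i) :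
    (l.set i a).getD j d = l.getD j d := by
  rw [getD_q, getD_q, setE, if_neg (by tauto)]

theorem getElem?_some_of_lt {α : Type} : ∀ (l : List α) (i : Nat), i < l.length → ∃ x, l[i]? = some x := by
  intro l
  induction l with
  | nil => intro i h; simp at h
  | cons x t ih =>
    intro i h
    cases i with
    | zero => exact ⟨x, rfl⟩
    | succ j =>
      rw [List.getElem?_cons_succ]
      exact ih j (by simp at h; omega)

theorem set_getD_self {α : Type} (l : List α) (i : Nat) (d : α) (h : i < l.length) :
    l.set i (l.getD i d) = l := by
  apply List.ext_getElem?
  intro j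
  rw [setE]
  by_cases hj : j = i ∧ j < l.length
  · obtain ⟨x, hx⟩ := getElem?_some_of_lt l i h
    rw [if_pos hj, hj.1, hx, getD_q, hx]
    rfl
  · rw [if_neg hj]

theorem set_set' {α : Type} (l : List α) (i : Nat) (a b : α) :
    (l.set i a).set i b = l.set i b := by
  apply List.ext_getElem?
  intro j
  rw [setE b (l.set i a) i j, setE b l i j, List.length_set]
  by_cases hj : j = i ∧ j < l.length
  · rw [if_pos hj, if_pos hj]
  · rw [if_neg hj, if_neg hj, setE a l i j, if_neg hj]

theorem mapConst {α β : Type} (c : β) : ∀ (l : List α), l.map (fun _ => c) = List.replicate l.length c := by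
  intro l
  induction l with
  | nil => simp
  | cons x t ih => simp [ih, List.replicate_succ]

theorem Tset {α : Type} : ∀ (l1 : List α) (z : α) (l2 : List α) (x : α),
    (l1 ++ z :: l2).set l1.length x = l1 ++ x :: l2 := by
  intro l1
  induction l1 with
  | nil => intro z l2 x; rfl
  | cons y t ih =>
    intro z l2 x
    show y :: ((t ++ z :: l2).set t.length x) = _
    rw [ih]
    rfl

theorem pyGetD_toNat {α : Type} (xs : List α) (i : Int) (d : α) (hi : 0 ≤ i) :
    PySem.List.pyGetD xs i d = xs.getD i.toNat d := by
  have h : i = ((i.toNat : Nat) : Int) := by omega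
  conv_lhs => rw [h]
  rw [PySem.List.pyGetD_natCast]

theorem pyRange01_getElem? (no : Int) (i : Nat) :
    (PySem.List.pyRange 0 (no+1) 1)[i]? = if i < (no+1).toNat then some (i:Int) else none := by
  rw [PySem.List.pyRange_one, mapE]
  have h0 : ((no+1) - 0 : Int) = no + 1 := by ring
  rw [h0, rangeE]
  by_cases h : i < (no+1).toNat
  · rw [if_pos h, if_pos h]
    simp
  · rw [if_neg h, if_neg h]
    rfl

-- ---- psum / Rrow facts ----

theorem psum_foldl (xs : List Int) : ∀ (a : Int) (l : List Int),
    (xs.foldl (fun (p : Int × List Int) v => (p.1 + v, (p.1 + v) :: p.2)) (a, l)).2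
      = (psum a xs).reverse ++ l := by
  induction xs with
  | nil => intro a l; simp [psum]
  | cons v t ih => intro a l; simp [List.foldl_cons, ih, psum]

-- list-level version of aInner, and the Array ↔ List bridge
def aInnerL (f : Int) (tb : List (List Int)) (n : Int) : List (List Int) :=
  tb.set f.toNat
    (PySem.List.pySetD (tb.getD f.toNat []) n
      (if f == 0 then n
       else (PySem.List.slice (tb.getD (f-1).toNat []) none (some (n+1))).sum))

def aOuterL (no : Int) (tb : List (List Int)) (f : Int) : List (List Int) :=
  (PySem.List.pyRange 1 (no+1) 1).foldl (aInnerL f) tb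

theorem arr_getD {α : Type} (a : Array α) (i : Nat) (d : α) :
    a[i]?.getD d = a.toList.getD i d := by
  rw [getD_q]
  simp

theorem aInner_toList (f : Int) (tb : Array (List Int)) (n : Int) :
    (aInner f tb n).toList = aInnerL f tb.toList n := by
  unfold aInner aInnerL
  rw [Array.toList_setIfInBounds, arr_getD, arr_getD]

theorem foldl_aInner_toList (f : Int) : ∀ (ns : List Int) (tb : Array (List Int)),
    (ns.foldl (aInner f) tb).toList = ns.foldl (aInnerL f) tb.toList := by
  intro ns
  induction ns with
  | nil => intro tb; rfl
  | cons n rest ih =>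
    intro tb
    rw [List.foldl_cons, List.foldl_cons, ih (aInner f tb n), aInner_toList]

theorem foldl_aOuter_toList (no : Int) : ∀ (fs : List Int) (tb : Array (List Int)),
    (fs.foldl (aOuter no) tb).toList = fs.foldl (aOuterL no) tb.toList := by
  intro fs
  induction fs with
  | nil => intro tb; rfl
  | cons f rest ih =>
    intro tb
    rw [List.foldl_cons, List.foldl_cons, ih (aOuter no tb f)]
    unfold aOuter aOuterL
    rw [foldl_aInner_toList]

theorem length_psum (xs : List Int) : ∀ a, (psum a xs).length = xs.length := by
  induction xs with
  | nil => intro a; simp [psum]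
  | cons v t ih => intro a; simp [psum, ih]

theorem psum_getElem? (xs : List Int) : ∀ (a : Int) (i : Nat),
    (psum a xs)[i]? = if i < xs.length then some (a + (xs.take (i+1)).sum) else none := by
  induction xs with
  | nil => intro a i; simp [psum]
  | cons v t ih =>
    intro a i
    cases i with
    | zero => simp [psum]
    | succ j => simp [psum, ih, add_assoc]

theorem length_Rrow (no : Int) : ∀ k, (Rrow no k).length = (no+1).toNat := by
  intro k
  induction k with
  | zero =>
    rw [show Rrow no 0 = PySem.List.pyRange 0 (no+1) 1 from rfl, PySem.List.length_pyRange_one]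
    omega
  | succ k ih =>
    rw [show Rrow no (k+1) = psum 0 (Rrow no k) from rfl, length_psum, ih]

theorem Rrow_head (no : Int) (hno : 0 ≤ no) : ∀ k, (Rrow no k)[0]? = some 0 := by
  intro k
  induction k with
  | zero =>
    have h := pyRange01_getElem? no 0
    rw [if_pos (by omega)] at h
    rw [show Rrow no 0 = PySem.List.pyRange 0 (no+1) 1 from rfl, h]
    norm_num
  | succ k ih =>
    have hl : 0 < (Rrow no k).length := by rw [length_Rrow]; omega
    rw [show Rrow no (k+1) = psum 0 (Rrow no k) from rfl, psum_getElem?, if_pos hl]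
    cases hx : Rrow no k with
    | nil => rw [hx] at hl; simp at hl
    | cons y ys =>
      have hy : y = 0 := by rw [hx] at ih; simpa using ih
      simp [hy]

-- ---- characterisation of A's folds ----

theorem foldl_setD_getElem? (val : Int → Int) (g : List Int → Int → List Int)
    (hg : ∀ r n, g r n = PySem.List.pySetD r n (val n)) :
    ∀ (ns : List Int) (r0 : List Int), (∀ n ∈ ns, 0 ≤ n) → ∀ (i : Nat),
    (ns.foldl g r0)[i]? =
      if ((i : Int) ∈ ns ∧ i < r0.length) then some (val (i : Int)) else r0[i]? := by
  intro ns
  induction ns with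
  | nil => intro r0 _ i; simp
  | cons n rest ih =>
    intro r0 hpos i
    have hn : 0 ≤ n := hpos n (by simp)
    rw [List.foldl_cons, hg, PySem.List.pySetD_of_nonneg r0 (val n) hn,
        ih (r0.set n.toNat (val n)) (fun m hm => hpos m (by simp [hm])) i,
        List.length_set, setE]
    by_cases h1 : (i:Int) ∈ rest ∧ i < r0.length
    · rw [if_pos h1, if_pos ⟨by simp [h1.1], h1.2⟩]
    · rw [if_neg h1]
      by_cases h2 : i = n.toNat ∧ i < r0.length
      · have hin : (i : Int) = n := by omega
        rw [if_pos h2, if_pos ⟨by simp [hin], h2.2⟩, hin]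
      · have h3 : ¬ ((i:Int) ∈ n :: rest ∧ i < r0.length) := by
          rintro ⟨hm, hl⟩
          rcases List.mem_cons.mp hm with h | h
          · exact h2 ⟨by omega, hl⟩
          · exact h1 ⟨h, hl⟩
        rw [if_neg h2, if_neg h3]

theorem inner_fold_table (f : Int) (hf : 0 ≤ f) (ns : List Int) :
    ∀ (tb : List (List Int)), f.toNat < tb.length →
    ns.foldl (aInnerL f) tb
    = tb.set f.toNat
        (ns.foldl (fun r n =>
            PySem.List.pySetD r n
              (if f == 0 then n
               else (PySem.List.slice (tb.getD (f-1).toNat []) none (some (n+1))).sum))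
          (tb.getD f.toNat [])) := by
  induction ns with
  | nil =>
    intro tb hlt
    rw [List.foldl_nil, List.foldl_nil, set_getD_self _ _ _ hlt]
  | cons n rest ih =>
    intro tb hlt
    rw [List.foldl_cons, List.foldl_cons]
    set r1 := PySem.List.pySetD (tb.getD f.toNat []) n
              (if f == 0 then n
               else (PySem.List.slice (tb.getD (f-1).toNat []) none (some (n+1))).sum) with hr1
    rw [show aInnerL f tb n = tb.set f.toNat r1 from rfl,
        ih (tb.set f.toNat r1) (by rw [List.length_set]; exact hlt),
        getD_set_self tb f.toNat r1 [] hlt, set_set' tb f.toNat r1]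
    congr 1
    apply PySem.List.foldl_congr_mem
    intro acc x hx
    by_cases hf0 : f = 0
    · simp [hf0]
    · rw [if_neg (by simp [beq_iff_eq, hf0]), if_neg (by simp [beq_iff_eq, hf0]),
          getD_set_ne tb f.toNat (f-1).toNat r1 [] (by omega)]

-- ---- the two row-processing lemmas ----

theorem row_zero (no : Int) (hno : 0 ≤ no) :
    (PySem.List.pyRange 1 (no+1) 1).foldl (fun r n => PySem.List.pySetD r n n) (zeroRow no)
      = Rrow no 0 := by
  have hpos : ∀ n ∈ PySem.List.pyRange 1 (no+1) 1, (0:Int) ≤ n := by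
    intro n hn
    rw [PySem.List.mem_pyRange_one] at hn
    omega
  apply List.ext_getElem?
  intro i
  rw [foldl_setD_getElem? (fun n => n) (fun r n => PySem.List.pySetD r n n) (fun _ _ => rfl)
        (PySem.List.pyRange 1 (no+1) 1) (zeroRow no) hpos i,
      show Rrow no 0 = PySem.List.pyRange 0 (no+1) 1 from rfl, pyRange01_getElem?]
  simp only [zeroRow, List.length_replicate, repE, PySem.List.mem_pyRange_one]
  by_cases hi : i < (no+1).toNat
  · by_cases h1 : (1:Int) ≤ (i:Int) ∧ (i:Int) < no + 1
    · rw [if_pos ⟨h1, hi⟩, if_pos hi]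
    · have hi0 : i = 0 := by omega
      subst hi0
      rw [if_neg (by tauto), if_pos hi, if_pos hi]
      norm_num
  · rw [if_neg (by omega), if_neg hi, if_neg hi]

theorem row_succ (no : Int) (hno : 0 ≤ no) (prev : List Int)
    (hlen : prev.length = (no+1).toNat) (hhead : prev[0]? = some 0) :
    (PySem.List.pyRange 1 (no+1) 1).foldl
      (fun r n => PySem.List.pySetD r n ((PySem.List.slice prev none (some (n+1))).sum))
      (zeroRow no) = psum 0 prev := by
  have hpos : ∀ n ∈ PySem.List.pyRange 1 (no+1) 1, (0:Int) ≤ n := by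
    intro n hn
    rw [PySem.List.mem_pyRange_one] at hn
    omega
  apply List.ext_getElem?
  intro i
  rw [foldl_setD_getElem? (fun n => (PySem.List.slice prev none (some (n+1))).sum)
        (fun r n => PySem.List.pySetD r n ((PySem.List.slice prev none (some (n+1))).sum))
        (fun _ _ => rfl) (PySem.List.pyRange 1 (no+1) 1) (zeroRow no) hpos i,
      psum_getElem?, hlen]
  simp only [zeroRow, List.length_replicate, repE, PySem.List.mem_pyRange_one]
  have hsl : (PySem.List.slice prev none (some ((i:Int)+1))).sum = (prev.take (i+1)).sum := by
    rw [PySem.List.slice_to prev (b := (i:Int)+1) (by omega)]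
    have h2 : ((i:Int)+1).toNat = i + 1 := by omega
    rw [h2]
  by_cases hi : i < (no+1).toNat
  · by_cases h1 : (1:Int) ≤ (i:Int) ∧ (i:Int) < no + 1
    · rw [if_pos ⟨h1, hi⟩, if_pos hi]
      show some ((PySem.List.slice prev none (some ((i:Int)+1))).sum) = _
      rw [hsl]
      norm_num
    · have hi0 : i = 0 := by omega
      subst hi0
      rw [if_neg (by tauto), if_pos hi, if_pos hi]
      cases prev with
      | nil => simp at hhead
      | cons p ps =>
        have hp : p = 0 := by simpa using hhead
        subst hp
        simp
  · rw [if_neg (by omega), if_neg hi, if_neg hi]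

-- ---- outer loop ----

theorem outer_step (no : Int) (hno : 0 ≤ no) (k : Nat) (tb : List (List Int))
    (hlen : k < tb.length)
    (hrow : tb.getD k [] = zeroRow no)
    (hprev : ∀ j : Nat, k = j + 1 → tb.getD j [] = Rrow no j) :
    aOuterL no tb (k : Int) = tb.set k (Rrow no k) := by
  unfold aOuterL
  have hf : (0:Int) ≤ (k:Int) := by omega
  have htn : ((k:Int)).toNat = k := by omega
  rw [inner_fold_table (k:Int) hf _ tb (by rw [htn]; exact hlen), htn, hrow]
  congr 1
  cases k with
  | zero =>
    rw [← row_zero no hno]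
    apply PySem.List.foldl_congr_mem
    intro acc x hx
    simp
  | succ j =>
    rw [show Rrow no (j+1) = psum 0 (Rrow no j) from rfl,
        ← row_succ no hno (Rrow no j) (length_Rrow no j) (Rrow_head no hno j)]
    apply PySem.List.foldl_congr_mem
    intro acc x hx
    have hne : ((j+1 : Nat) : Int) ≠ 0 := by omega
    rw [if_neg (by simpa [beq_iff_eq] using hne)]
    have h1 : (((j+1:Nat):Int) - 1).toNat = j := by omega
    rw [h1, hprev j rfl]

theorem outer_loop (no floor : Int) (hno : 0 ≤ no) (_hfl : 0 ≤ floor) :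
    ∀ (k : Nat), k ≤ floor.toNat + 1 →
    (PySem.List.pyRange 0 (k:Int) 1).foldl (aOuterL no)
        (List.replicate (floor.toNat + 1) (zeroRow no))
    = (List.range k).map (Rrow no) ++ List.replicate (floor.toNat + 1 - k) (zeroRow no) := by
  intro k
  induction k with
  | zero =>
    intro _
    have h0 : PySem.List.pyRange 0 ((0:Nat):Int) 1 = [] := PySem.List.pyRange_one_eq_nil (by norm_num)
    rw [h0, List.foldl_nil]
    simp
  | succ k ih =>
    intro hk
    have hcast : ((k+1:Nat):Int) = (k:Int) + 1 := by omega
    rw [hcast, PySem.List.pyRange_one_succ_right (a := 0) (b := (k:Int)) (by omega),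
        List.foldl_append, List.foldl_cons, List.foldl_nil, ih (by omega)]
    rw [outer_step no hno k _
      (by simp [List.length_append, List.length_map, List.length_range, List.length_replicate]; omega)
      (by rw [getD_q, appR _ _ k (by simp),
              show k - ((List.range k).map (Rrow no)).length = 0 from by simp,
              repE, if_pos (by omega)]
          rfl)
      (by intro j hkj
          rw [getD_q, appL _ _ j (by simp; omega), mapE, rangeE, if_pos (by omega)]
          rfl)]
    have hrep : List.replicate (floor.toNat + 1 - k) (zeroRow no)
        = zeroRow no :: List.replicate (floor.toNat + 1 - (k+1)) (zeroRow no) := by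
      rw [show floor.toNat + 1 - k = (floor.toNat + 1 - (k+1)) + 1 from by omega, List.replicate_succ]
    rw [hrep]
    have hT := Tset ((List.range k).map (Rrow no)) (zeroRow no)
        (List.replicate (floor.toNat + 1 - (k+1)) (zeroRow no)) (Rrow no k)
    rw [show ((List.range k).map (Rrow no)).length = k from by simp] at hT
    rw [hT, List.range_succ, List.map_append]
    simp

-- ---- evaluation of the two ports ----

theorem solution_eval (floor no : Int) (hf : 0 ≤ floor) (hn : 0 ≤ no) :
    solution floor no = (Rrow no floor.toNat).getD no.toNat 0 := by
  unfold solution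
  have hinit : (PySem.List.pyRange 0 (floor+1) 1).map (fun _ => PySem.List.pyRepeat [(0:Int)] (no+1))
      = List.replicate (floor.toNat + 1) (zeroRow no) := by
    rw [mapConst, PySem.List.length_pyRange_one, PySem.List.pyRepeat_singleton,
        show ((floor + 1) - 0).toNat = floor.toNat + 1 from by omega]
    rfl
  rw [hinit, foldl_aOuter_toList,
      show ((List.replicate (floor.toNat + 1) (zeroRow no)).toArray).toList
        = List.replicate (floor.toNat + 1) (zeroRow no) from by simp,
      show floor + 1 = ((floor.toNat + 1 : Nat) : Int) from by omega,
      outer_loop no floor hn hf (floor.toNat + 1) (le_refl _),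
      show floor.toNat + 1 - (floor.toNat + 1) = 0 from by omega,
      List.replicate_zero, List.append_nil,
      pyGetD_toNat _ floor _ hf, pyGetD_toNat _ no _ hn]
  rw [show ((List.range (floor.toNat + 1)).map (Rrow no)).getD floor.toNat [] = Rrow no floor.toNat from by
        rw [getD_q, mapE, rangeE, if_pos (by omega)]; rfl]

theorem bScan_psum (row : List Int) : bScan row = psum 0 row := by
  unfold bScan
  rw [psum_foldl]
  simp

theorem alt_loop (no : Int) : ∀ (k : Nat),
    (PySem.List.pyRange 0 (k:Int) 1).foldl (fun row _ => bScan row) (PySem.List.pyRange 0 (no+1) 1)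
      = Rrow no k := by
  intro k
  induction k with
  | zero =>
    have h0 : PySem.List.pyRange 0 ((0:Nat):Int) 1 = [] := PySem.List.pyRange_one_eq_nil (by norm_num)
    rw [h0, List.foldl_nil]
    rfl
  | succ k ih =>
    have hcast : ((k+1:Nat):Int) = (k:Int) + 1 := by omega
    rw [hcast, PySem.List.pyRange_one_succ_right (a := 0) (b := (k:Int)) (by omega),
        List.foldl_append, ih, List.foldl_cons, List.foldl_nil, bScan_psum]
    rfl

theorem solution_alt_eval (floor no : Int) (hf : 0 ≤ floor) (hn : 0 ≤ no) :
    solution_alt floor no = (Rrow no floor.toNat).getD no.toNat 0 := by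
  unfold solution_alt
  conv_lhs => rw [show floor = ((floor.toNat : Nat) : Int) from by omega]
  rw [alt_loop no floor.toNat, pyGetD_toNat _ no _ hn]

-- ===== VERDICT (by name: the statement is the Claim_ definition above) =====
theorem solution_spec : Claim_equal_solution := by
  intro floor no _ hpre
  unfold Spec_solution
  rw [solution_eval floor no hpre.1 hpre.2, solution_alt_eval floor no hpre.1 hpre.2]
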